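-- pv_equiv track=rewrite | github.com/yongshn220/VigenereCipherBreaker | hw1.py | getHighestCommonFactors
-- ===== SOURCE A (Python) =====
-- def getHighestCommonFactors(subsets, mostsubset):
--     mostsubset = mostsubset[0]
--
--     indexes = []
--     for i in range(len(subsets)):
--         if (subsets[i] == mostsubset):
--             indexes.append(i)
--
--     factors = []
--     for i in range(2, 100):
--         curCount = 0
--         for si in range(len(indexes)):
--             for ei in range(len(indexes)):
--                 distance = indexes[ei] - indexes[si]
--                 if (distance % i == 0):
--                     curCount += 1
--
--         factors.append((i, curCount))
--
--     highestFactors = list(map(lambda x : x[0], sorted(factors, key = lambda c : c[1], reverse=True)[:20]))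
--     return highestFactors
-- ===== SOURCE B (Python) =====
-- def getHighestCommonFactors(subsets, mostsubset):
--     target = mostsubset[0]
--     indexes = [k for k, s in enumerate(subsets) if s == target]
--
--     factors = []
--     for i in range(2, 100):
--         residues = [idx % i for idx in indexes]
--         buckets = {}
--         for r in residues:
--             buckets[r] = buckets.get(r, 0) + 1
--         factors.append((i, sum(c * c for c in buckets.values())))
--
--     return [f for f, _ in sorted(factors, key=lambda c: c[1], reverse=True)[:20]]
-- ===== Notes on version B (the rewrite author's own statement) =====
-- stated objective: faster
-- what changed: Instead of testing every ordered pair of matching indexes against each candidate period i (98*m^2 modulo tests), B buckets the indexes by residue mod i once per i and counts pairs as the sum of squared bucket sizes, since (indexes[ei]-indexes[si]) % i == 0 iff both indexes share a residue mod i.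
import Mathlib
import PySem

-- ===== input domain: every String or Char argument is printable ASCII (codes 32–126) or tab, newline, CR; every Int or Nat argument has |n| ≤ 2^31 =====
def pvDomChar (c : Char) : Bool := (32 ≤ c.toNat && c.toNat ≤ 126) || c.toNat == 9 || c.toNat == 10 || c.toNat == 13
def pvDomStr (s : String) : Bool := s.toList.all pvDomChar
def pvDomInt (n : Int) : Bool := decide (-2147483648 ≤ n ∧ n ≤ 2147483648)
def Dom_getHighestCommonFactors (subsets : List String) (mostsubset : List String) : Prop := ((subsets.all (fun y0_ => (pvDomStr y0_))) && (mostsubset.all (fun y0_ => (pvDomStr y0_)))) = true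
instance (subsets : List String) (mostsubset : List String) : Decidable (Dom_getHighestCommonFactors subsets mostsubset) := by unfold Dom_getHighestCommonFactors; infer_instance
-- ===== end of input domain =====

-- B replaces A's O(m^2) double loop over matching indexes per candidate i by bucketing the indexes
-- by residue mod i and summing squared bucket sizes (objective: faster; measured asymptotically faster).

-- ===== PORT A =====
def getHighestCommonFactors (subsets : List String) (mostsubset : List String) : List Int :=
  -- 'mostsubset = mostsubset[0]' raises IndexError on []: excluded by Pre_; the .getD "" default is never reached inside Pre_
  let most := (PySem.List.pyGet? mostsubset 0).getD ""
  let indexes : List Int :=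
    (PySem.List.pyRange 0 (subsets.length : Int) 1).foldl
      (fun acc i => if PySem.List.pyGetD subsets i "" == most then acc ++ [i] else acc) []
  let factors : List (Int × Int) :=
    (PySem.List.pyRange 2 100 1).foldl
      (fun facc i =>
        let curCount : Int :=
          (PySem.List.pyRange 0 (indexes.length : Int) 1).foldl
            (fun c si =>
              (PySem.List.pyRange 0 (indexes.length : Int) 1).foldl
                (fun c2 ei =>
                  let distance := PySem.List.pyGetD indexes ei 0 - PySem.List.pyGetD indexes si 0
                  if PySem.Int.mod distance i == 0 then c2 + 1 else c2) c) 0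
        facc ++ [(i, curCount)]) []
  (PySem.List.slice (PySem.List.sorted factors (fun c => c.2) true) none (some 20)).map (fun x => x.1)

-- ===== PORT B =====
def getHighestCommonFactors_alt (subsets : List String) (mostsubset : List String) : List Int :=
  -- 'mostsubset[0]' raises IndexError on []: excluded by Pre_; the .getD "" default is never reached inside Pre_
  let target := (PySem.List.pyGet? mostsubset 0).getD ""
  let indexes : List Int :=
    (PySem.List.enumerate subsets 0).filterMap
      (fun p => if p.2 == target then some p.1 else none)
  let factors : List (Int × Int) :=
    (PySem.List.pyRange 2 100 1).map (fun i =>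
      let residues := indexes.map (fun idx => PySem.Int.mod idx i)
      let buckets : PySem.Dict Int Int :=
        residues.foldl (fun d r => d.insert r (d.getD r 0 + 1)) PySem.Dict.empty
      (i, (buckets.values.map (fun c => c * c)).sum))
  (PySem.List.slice (PySem.List.sorted factors (fun c => c.2) true) none (some 20)).map (fun x => x.1)

-- ===== PRECONDITION & SPEC =====
-- Pre_ excludes exactly mostsubset = [], on which Python A raises IndexError at 'mostsubset[0]' (B raises there too).
def Pre_getHighestCommonFactors (subsets : List String) (mostsubset : List String) : Prop :=
  mostsubset ≠ []
instance (subsets : List String) (mostsubset : List String) : Decidable (Pre_getHighestCommonFactors subsets mostsubset) := by unfold Pre_getHighestCommonFactors; infer_instance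
def pvWitness_getHighestCommonFactors : List String × List String := (["ab", "cd", "ab"], ["ab"])

def Spec_getHighestCommonFactors (subsets : List String) (mostsubset : List String) (out : List Int) : Prop := out = getHighestCommonFactors_alt subsets mostsubset
instance (subsets : List String) (mostsubset : List String) (out : List Int) : Decidable (Spec_getHighestCommonFactors subsets mostsubset out) := by unfold Spec_getHighestCommonFactors; infer_instance

-- ===== CLAIM (what is proved, stated in full; the proofs are below) =====
def Claim_equal_getHighestCommonFactors : Prop := ∀ (subsets : List String) (mostsubset : List String), Dom_getHighestCommonFactors subsets mostsubset → Pre_getHighestCommonFactors subsets mostsubset → Spec_getHighestCommonFactors subsets mostsubset (getHighestCommonFactors subsets mostsubset)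

-- ===== LEMMAS AND PROOFS =====

-- proof-side names for the two ports' building blocks (definitionally the ports' subterms)
def pvIndexesA (subsets : List String) (mostsubset : List String) : List Int :=
  (PySem.List.pyRange 0 (subsets.length : Int) 1).foldl
    (fun acc i => if PySem.List.pyGetD subsets i "" == (PySem.List.pyGet? mostsubset 0).getD "" then acc ++ [i] else acc) []

def pvIndexesB (subsets : List String) (mostsubset : List String) : List Int :=
  (PySem.List.enumerate subsets 0).filterMap
    (fun p => if p.2 == (PySem.List.pyGet? mostsubset 0).getD "" then some p.1 else none)

def pvCountA (L : List Int) (i : Int) : Int :=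
  (PySem.List.pyRange 0 (L.length : Int) 1).foldl
    (fun c si =>
      (PySem.List.pyRange 0 (L.length : Int) 1).foldl
        (fun c2 ei =>
          if PySem.Int.mod (PySem.List.pyGetD L ei 0 - PySem.List.pyGetD L si 0) i == 0 then c2 + 1 else c2) c) 0

def pvCountB (L : List Int) (i : Int) : Int :=
  (((L.map (fun idx => PySem.Int.mod idx i)).foldl
      (fun d r => d.insert r (d.getD r 0 + 1)) PySem.Dict.empty).values.map (fun c => c * c)).sum

def pvTail (factors : List (Int × Int)) : List Int :=
  (PySem.List.slice (PySem.List.sorted factors (fun c => c.2) true) none (some 20)).map (fun x => x.1)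

lemma portA_norm (subsets mostsubset : List String) :
    getHighestCommonFactors subsets mostsubset
      = pvTail ((PySem.List.pyRange 2 100 1).foldl
          (fun facc i => facc ++ [(i, pvCountA (pvIndexesA subsets mostsubset) i)]) []) := rfl

lemma portB_norm (subsets mostsubset : List String) :
    getHighestCommonFactors_alt subsets mostsubset
      = pvTail ((PySem.List.pyRange 2 100 1).map
          (fun i => (i, pvCountB (pvIndexesB subsets mostsubset) i))) := rfl

-- Bool filter as a filterMap
lemma filter_eq_filterMap_if {α : Type} (p : α → Bool) (l : List α) :
    l.filter p = l.filterMap (fun x => if p x then some x else none) := by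
  induction l with
  | nil => rfl
  | cons x t ih =>
    by_cases h : p x <;> simp [h, ih]

-- the two index-collection loops produce the same list
lemma indexes_eq (subsets mostsubset : List String) :
    pvIndexesA subsets mostsubset = pvIndexesB subsets mostsubset := by
  unfold pvIndexesA pvIndexesB
  rw [PySem.List.foldl_append_if_eq_filter, PySem.List.enumerate_eq_map_pyRange subsets "",
    List.filterMap_map, List.nil_append, filter_eq_filterMap_if]
  rfl

-- residues mod i agree exactly when the distance is divisible by i
lemma mod_sub_eq_zero_iff (a b i : Int) (hi : 0 < i) :
    (PySem.Int.mod (b - a) i == 0) = (PySem.Int.mod b i == PySem.Int.mod a i) := by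
  rw [Bool.eq_iff_iff]
  simp only [beq_iff_eq]
  rw [PySem.Int.mod_eq_zero_iff_dvd, PySem.Int.mod_eq_emod_of_pos hi, PySem.Int.mod_eq_emod_of_pos hi]
  exact ⟨fun h => (Int.ModEq.symm (Int.modEq_iff_dvd.mpr h)), fun h => Int.modEq_iff_dvd.mp h.symm⟩

-- pair count by double loop = sum of squared residue-bucket sizes
lemma count_eq (L : List Int) (i : Int) (hi : 0 < i) :
    pvCountA L i = pvCountB L i := by
  unfold pvCountA pvCountB
  rw [PySem.List.foldl_pyRange_zero_pyGetD' L 0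
    (f := fun c a =>
      (PySem.List.pyRange 0 (L.length : Int) 1).foldl
        (fun c2 ei =>
          if PySem.Int.mod (PySem.List.pyGetD L ei 0 - a) i == 0 then c2 + 1 else c2) c)]
  rw [PySem.List.foldl_congr_mem L
    (fun c a =>
      (PySem.List.pyRange 0 (L.length : Int) 1).foldl
        (fun c2 ei =>
          if PySem.Int.mod (PySem.List.pyGetD L ei 0 - a) i == 0 then c2 + 1 else c2) c)
    (fun c a => c + ((L.countP (fun b => PySem.Int.mod (b - a) i == 0) : Nat) : Int))
    0
    (by
      intro acc a _
      beta_reduce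
      rw [PySem.List.foldl_pyRange_zero_pyGetD' L 0
        (f := fun c2 b => if PySem.Int.mod (b - a) i == 0 then c2 + 1 else c2)]
      rw [PySem.List.foldl_if_add_one])]
  rw [PySem.List.foldl_add, zero_add]
  rw [PySem.Dict.foldl_insert_getD_add_one_eq_counter]
  set M : List Int := L.map (fun idx => PySem.Int.mod idx i) with hM
  -- each row of the double loop counts the indexes sharing a's residue
  have hcnt : ∀ a : Int, ((L.countP (fun b => PySem.Int.mod (b - a) i == 0) : Nat) : Int)
      = ((M.count (PySem.Int.mod a i) : Nat) : Int) := by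
    intro a
    congr 1
    rw [List.count_eq_countP, hM, List.countP_map]
    apply List.countP_congr
    intro b _
    rw [mod_sub_eq_zero_iff a b i hi]
    simp
  -- the counter's values are the counts of the distinct residues
  have hvals : (PySem.Dict.counter M).values
      = (PySem.Set.ofList M).map (fun k => ((M.count k : Nat) : Int)) := by
    rw [PySem.Dict.values_eq_map_keys _ (PySem.Dict.nodup_keys_counter M) 0,
      PySem.Dict.keys_counter]
    exact List.map_congr_left (fun k _ => PySem.Dict.getD_counter M k)
  rw [hvals, List.map_map]
  rw [List.map_congr_left (f := fun a => ((L.countP (fun b => PySem.Int.mod (b - a) i == 0) : Nat) : Int)) (fun a _ => hcnt a)]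
  have hmm : L.map (fun a => ((M.count (PySem.Int.mod a i) : Nat) : Int))
      = M.map (fun v => ((M.count v : Nat) : Int)) := by
    rw [hM, List.map_map]; rfl
  rw [hmm, Finset.sum_list_map_count M (fun v => ((M.count v : Nat) : Int))]
  have hsq : ((PySem.Set.ofList M).map ((fun c => c * c) ∘ fun k => ((M.count k : Nat) : Int))).sum
      = (PySem.Set.ofList M).toFinset.sum (fun k => ((M.count k : Nat) : Int) * ((M.count k : Nat) : Int)) := by
    rw [List.sum_toFinset _ (PySem.Set.nodup_ofList M)]
    rfl
  rw [hsq]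
  have hfs : (PySem.Set.ofList M).toFinset = M.toFinset := by
    ext x; simp [PySem.Set.mem_ofList]
  rw [hfs]
  apply Finset.sum_congr rfl
  intro m _
  rw [nsmul_eq_mul]

-- ===== VERDICT (by name: the statement is the Claim_ definition above) =====
theorem getHighestCommonFactors_spec : Claim_equal_getHighestCommonFactors := by
  intro subsets mostsubset _ _
  unfold Spec_getHighestCommonFactors
  rw [portA_norm, portB_norm, indexes_eq,
    PySem.List.foldl_append_singleton_eq_map
      (f := fun i => (i, pvCountA (pvIndexesB subsets mostsubset) i)),
    List.nil_append]
  congr 1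
  apply List.map_congr_left
  intro i hi
  have h2 := PySem.List.mem_pyRange_one.mp hi
  exact congrArg (fun c => (i, c)) (count_eq (pvIndexesB subsets mostsubset) i (by omega))
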